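-- pv_equiv track=rewrite | github.com/Armanyich/aaa-final-reviewed | src/webconf_audit/external/rules/_helpers.py | _hostname_matches_san
-- ===== SOURCE A (Python) =====
-- def _hostname_matches_san(hostname: str, san_entries: tuple[str, ...]) -> bool:
--     """Check whether *hostname* matches any SAN entry (case-insensitive).
--
--     Supports simple wildcard matching: ``*.example.com`` matches
--     ``sub.example.com`` but not ``example.com`` or ``a.b.example.com``.
--     """
--     hostname_lower = hostname.lower()
--     for entry in san_entries:
--         entry_lower = entry.lower()
--         if entry_lower == hostname_lower:
--             return True
--         if entry_lower.startswith("*."):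
--             # Wildcard: *.example.com matches sub.example.com
--             wildcard_base = entry_lower[2:]
--             # hostname must end with .example.com and have exactly one
--             # additional label (no nested sub-subdomains matched).
--             if hostname_lower.endswith(f".{wildcard_base}"):
--                 prefix = hostname_lower[: -(len(wildcard_base) + 1)]
--                 if "." not in prefix:
--                     return True
--     return False
-- ===== SOURCE B (Python) =====
-- def _hostname_matches_san(hostname: str, san_entries: tuple[str, ...]) -> bool:
--     """Check whether *hostname* matches any SAN entry (case-insensitive).
--
--     Instead of re-deriving the wildcard condition per entry, precompute the
--     (at most two) entry strings that can match this hostname -- the hostname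
--     itself and its one-level wildcard form -- then test set membership.
--     """
--     hl = hostname.lower()
--     targets = {hl}
--     i = hl.find(".")
--     if i != -1:
--         # *.rest matches hl exactly when rest is everything after the FIRST dot
--         targets.add("*." + hl[i + 1:])
--     for entry in san_entries:
--         if entry.lower() in targets:
--             return True
--     return False
-- ===== Notes on version B (the rewrite author's own statement) =====
-- stated objective: simpler
-- what changed: B precomputes once the at-most-two entry strings that can match the hostname (hostname.lower() and its one-level wildcard form derived from the first dot), so the loop body is a single set-membership test per entry instead of A's per-entry startswith/endswith/slice/substring wildcard analysis.
import Mathlib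
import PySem

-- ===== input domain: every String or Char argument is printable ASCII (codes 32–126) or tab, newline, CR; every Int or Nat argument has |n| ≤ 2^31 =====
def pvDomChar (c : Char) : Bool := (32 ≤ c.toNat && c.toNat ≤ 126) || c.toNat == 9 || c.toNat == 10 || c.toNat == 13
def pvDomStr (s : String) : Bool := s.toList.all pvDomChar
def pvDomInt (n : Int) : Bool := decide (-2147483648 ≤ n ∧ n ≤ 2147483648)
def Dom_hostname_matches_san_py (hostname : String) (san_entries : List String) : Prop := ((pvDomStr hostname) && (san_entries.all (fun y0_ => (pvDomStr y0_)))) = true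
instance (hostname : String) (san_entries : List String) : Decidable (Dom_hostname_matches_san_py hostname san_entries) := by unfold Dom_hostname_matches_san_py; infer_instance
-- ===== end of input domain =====

-- B precomputes the (at most two) names the hostname can match (the lowered hostname and its one-level wildcard form), replacing A's per-entry wildcard analysis by a set-membership test: a simpler decomposition.


-- ===== PORT A =====
-- the for-loop over san_entries, with hostname_lower fixed
def pvLoopA (hl : List Char) : List String → Bool
  | [] => false
  | entry :: rest =>
    let el := PySem.Chars.lower entry.toList
    if el = hl then true
    else if PySem.Chars.startswith el ['*', '.'] then
      let base := PySem.List.slice el (some 2) none          -- entry_lower[2:]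
      if PySem.Chars.endswith hl ('.' :: base) then          -- hostname ends with "." + wildcard_base
        let pre := PySem.List.slice hl none (some (-(base.length + 1 : Int)))  -- hostname_lower[:-(len(base)+1)]
        if PySem.Chars.isIn ['.'] pre then pvLoopA hl rest else true
      else pvLoopA hl rest
    else pvLoopA hl rest

def hostname_matches_san_py (hostname : String) (san_entries : List String) : Bool :=
  pvLoopA (PySem.Chars.lower hostname.toList) san_entries

-- ===== PORT B =====
def hostname_matches_san_py_alt (hostname : String) (san_entries : List String) : Bool :=
  let hl := PySem.Chars.lower hostname.toList
  let i := PySem.Chars.find hl ['.']                          -- hl.find(".")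
  let targets : PySem.Set (List Char) :=
    if i ≠ -1 then
      (PySem.Set.ofList [hl]).add ('*' :: '.' :: PySem.List.slice hl (some (i + 1)) none)  -- "*." + hl[i+1:]
    else PySem.Set.ofList [hl]
  san_entries.any (fun entry => targets.contains (PySem.Chars.lower entry.toList))

-- ===== PRECONDITION & SPEC =====
def Spec_hostname_matches_san_py (hostname : String) (san_entries : List String) (out : Bool) : Prop := out = hostname_matches_san_py_alt hostname san_entries
instance (hostname : String) (san_entries : List String) (out : Bool) : Decidable (Spec_hostname_matches_san_py hostname san_entries out) := by unfold Spec_hostname_matches_san_py; infer_instance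

-- ===== CLAIM (what is proved, stated in full; the proofs are below) =====
def Claim_equal_hostname_matches_san_py : Prop := ∀ (hostname : String) (san_entries : List String), Dom_hostname_matches_san_py hostname san_entries → Spec_hostname_matches_san_py hostname san_entries (hostname_matches_san_py hostname san_entries)

-- ===== LEMMAS AND PROOFS =====

theorem pv_slice_to_neg {α : Type} (xs : List α) (k : Nat) (hk0 : 0 < k) (hk : k ≤ xs.length) :
    PySem.List.slice xs none (some (-(k : Int))) = xs.take (xs.length - k) := by
  simp only [PySem.List.slice, PySem.List.clampIdx]
  rw [if_pos (by omega), if_neg (by omega)]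
  simp only [List.drop_zero]
  congr 1
  omega

theorem pv_split_unique : ∀ (p : List Char) (r q s : List Char),
    p ++ '.' :: r = q ++ '.' :: s → '.' ∉ p → '.' ∉ q → p = q ∧ r = s := by
  intro p
  induction p with
  | nil =>
      intro r q s h hp hq
      cases q with
      | nil => simpa using h
      | cons b q' =>
          simp only [List.nil_append, List.cons_append, List.cons.injEq] at h
          exact absurd (by simp [← h.1]) hq
  | cons a p' ih =>
      intro r q s h hp hq
      cases q with
      | nil =>
          simp only [List.cons_append, List.nil_append, List.cons.injEq] at h
          exact absurd (by simp [h.1]) hp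
      | cons b q' =>
          simp only [List.cons_append, List.cons.injEq] at h
          obtain ⟨hpq, hrs⟩ := ih r q' s h.2 (fun hm => hp (List.mem_cons_of_mem _ hm)) (fun hm => hq (List.mem_cons_of_mem _ hm))
          exact ⟨by rw [h.1, hpq], hrs⟩

theorem pv_entry_iff (hl el : List Char) :
    (el = hl ∨ (PySem.Chars.startswith el ['*', '.'] = true ∧
      PySem.Chars.endswith hl ('.' :: PySem.List.slice el (some 2) none) = true ∧
      PySem.Chars.isIn ['.'] (PySem.List.slice hl none
        (some (-((PySem.List.slice el (some 2) none).length + 1 : Int)))) = false))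
    ↔ (el = hl ∨ (PySem.Chars.find hl ['.'] ≠ -1 ∧
        el = '*' :: '.' :: PySem.List.slice hl (some (PySem.Chars.find hl ['.'] + 1)) none)) := by
  have hb2 : PySem.List.slice el (some 2) none = el.drop 2 := by
    have := PySem.List.slice_from el (a := 2) (by omega)
    simpa using this
  rcases le_or_gt 0 (PySem.Chars.find hl ['.']) with hj | hj
  · set j := PySem.Chars.find hl ['.'] with hjdef
    have hjne : j ≠ -1 := by omega
    obtain ⟨hpre, hmin⟩ := PySem.Chars.find_spec (s := hl) (sub := ['.']) hj
    set jn := j.toNat with hjn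
    have hjlt : jn < hl.length := by
      by_contra hge
      push Not at hge
      rw [List.drop_eq_nil_of_le hge] at hpre
      simpa using List.eq_nil_of_prefix_nil hpre
    have hdrop : hl.drop jn = '.' :: hl.drop (jn + 1) := by
      obtain ⟨t, ht⟩ := hpre
      rw [← ht]
      have h2 : hl.drop (jn + 1) = t := by
        have h3 := congrArg (List.drop 1) ht
        simpa [List.drop_drop] using h3.symm
      rw [h2]
      rfl
    set p := hl.take jn with hpdef
    set r := hl.drop (jn + 1) with hrdef
    have hsplit : hl = p ++ '.' :: r := by
      conv_lhs => rw [← List.take_append_drop jn hl]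
      rw [hdrop]
    have hplen : p.length = jn := List.length_take_of_le (by omega)
    have hpnodot : '.' ∉ p := by
      intro hm
      obtain ⟨i, hi, hgi⟩ := List.mem_iff_getElem.mp hm
      have hilt : i < jn := by omega
      refine hmin i hilt ?_
      have hd : hl.drop i = hl[i] :: hl.drop (i + 1) := List.drop_eq_getElem_cons (by omega)
      rw [hd]
      have hg : hl[i] = '.' := by
        rw [← hgi]; simp [hpdef, List.getElem_take]
      simp [hg]
    have hslice : PySem.List.slice hl (some (j + 1)) none = r := by
      rw [PySem.List.slice_from hl (by omega)]
      congr 1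
      omega
    constructor
    · rintro (h | ⟨hsw, hew, hni⟩)
      · exact Or.inl h
      · right
        refine ⟨hjne, ?_⟩
        rw [hslice]
        rw [PySem.Chars.startswith_iff] at hsw
        obtain ⟨t, ht⟩ := hsw
        have hbase : PySem.List.slice el (some 2) none = t := by rw [hb2, ← ht]; rfl
        rw [PySem.Chars.endswith_iff] at hew
        obtain ⟨q, hq⟩ := hew
        rw [hbase] at hq hni
        have hlen : hl.length = q.length + (t.length + 1) := by
          rw [← hq]; simp
        have hpreq : PySem.List.slice hl none (some (-((t.length + 1 : Nat) : Int))) = q := by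
          rw [pv_slice_to_neg hl (t.length + 1) (by omega) (by omega),
            show hl.length - (t.length + 1) = q.length from by omega, ← hq]
          exact List.take_left ..
        have hni' : '.' ∉ q := by
          rw [show (-((t.length : Int) + 1)) = (-((t.length + 1 : Nat) : Int)) from by push_cast; ring,
            hpreq, PySem.Chars.isIn_eq_false_iff] at hni
          exact fun hm => hni ((List.singleton_infix_iff _ _).mpr hm)
        obtain ⟨hq1, hq2⟩ := pv_split_unique q t p r (hq.trans hsplit) hni' hpnodot
        rw [← ht, hq2]
        rfl
    · rintro (h | ⟨-, hel⟩)
      · exact Or.inl h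
      · right
        rw [hslice] at hel
        subst hel
        have hbase : PySem.List.slice ('*' :: '.' :: r) (some 2) none = r := by
          rw [hb2]; rfl
        rw [hbase]
        refine ⟨by rw [PySem.Chars.startswith_iff]; exact ⟨r, rfl⟩, ?_, ?_⟩
        · rw [PySem.Chars.endswith_iff]; exact ⟨p, hsplit.symm⟩
        · have hlen : hl.length = p.length + (r.length + 1) := by rw [hsplit]; simp
          rw [show (-((r.length : Int) + 1)) = (-((r.length + 1 : Nat) : Int)) from by push_cast; ring,
            pv_slice_to_neg hl (r.length + 1) (by omega) (by omega),
            show hl.length - (r.length + 1) = p.length from by omega, hsplit]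
          rw [List.take_left, PySem.Chars.isIn_eq_false_iff]
          exact fun hinf => hpnodot ((List.singleton_infix_iff _ _).mp hinf)
  · have hne : PySem.Chars.find hl ['.'] = -1 := by
      have := PySem.Chars.neg_one_le_find hl ['.']
      omega
    have hnodot : ¬ (['.'] <:+: hl) := (PySem.Chars.find_eq_neg_one_iff hl ['.']).mp hne
    constructor
    · rintro (h | ⟨-, hew, -⟩)
      · exact Or.inl h
      · exact absurd ((PySem.Chars.endswith_iff _ _).mp hew).sublist.subset
          (by intro hsub; exact hnodot ((List.singleton_infix_iff _ _).mpr (hsub (by simp))))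
    · rintro (h | ⟨hne', -⟩)
      · exact Or.inl h
      · exact absurd hne hne'

-- membership in B's target set, as a proposition
theorem pv_targets_mem (hl x : List Char) :
    ((if PySem.Chars.find hl ['.'] ≠ -1 then
        (PySem.Set.ofList [hl]).add ('*' :: '.' :: PySem.List.slice hl (some (PySem.Chars.find hl ['.'] + 1)) none)
      else PySem.Set.ofList [hl]).contains x = true)
    ↔ (x = hl ∨ (PySem.Chars.find hl ['.'] ≠ -1 ∧
        x = '*' :: '.' :: PySem.List.slice hl (some (PySem.Chars.find hl ['.'] + 1)) none)) := by
  split_ifs with h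
  · rw [show (PySem.Set.contains _ x = true) ↔ x ∈ _ from List.contains_iff_mem,
      PySem.Set.mem_add, PySem.Set.mem_ofList]
    simp [h]
  · rw [show (PySem.Set.contains _ x = true) ↔ x ∈ _ from List.contains_iff_mem,
      PySem.Set.mem_ofList]
    simp [h]

-- one step of A's loop, flattened to a disjunction of the per-entry test and the recursion
theorem pvLoopA_cons (hl : List Char) (e : String) (rest : List String) :
    pvLoopA hl (e :: rest) =
      ((decide (PySem.Chars.lower e.toList = hl) ||
        (PySem.Chars.startswith (PySem.Chars.lower e.toList) ['*', '.'] &&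
         (PySem.Chars.endswith hl ('.' :: PySem.List.slice (PySem.Chars.lower e.toList) (some 2) none) &&
          !PySem.Chars.isIn ['.'] (PySem.List.slice hl none
            (some (-((PySem.List.slice (PySem.Chars.lower e.toList) (some 2) none).length + 1 : Int)))))))
       || pvLoopA hl rest) := by
  show (if _ then _ else _) = _
  split_ifs with h1 h2 <;> try simp_all
  split_ifs <;> simp_all

-- the equivalence itself (Dom is not needed)
theorem pv_main (hostname : String) (san_entries : List String) :
    hostname_matches_san_py hostname san_entries = hostname_matches_san_py_alt hostname san_entries := by
  unfold hostname_matches_san_py hostname_matches_san_py_alt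
  induction san_entries with
  | nil => rfl
  | cons e rest ih =>
      rw [pvLoopA_cons, List.any_cons, ih]
      congr 1
      rw [Bool.eq_iff_iff]
      simp only [Bool.or_eq_true, Bool.and_eq_true, Bool.not_eq_eq_eq_not, Bool.not_true,
        decide_eq_true_eq]
      exact (pv_entry_iff (PySem.Chars.lower hostname.toList) (PySem.Chars.lower e.toList)).trans
        (pv_targets_mem (PySem.Chars.lower hostname.toList) (PySem.Chars.lower e.toList)).symm

-- ===== VERDICT (by name: the statement is the Claim_ definition above) =====
theorem hostname_matches_san_py_spec : Claim_equal_hostname_matches_san_py :=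
  fun hostname san_entries _ => pv_main hostname san_entries
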